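-- pv_equiv track=rewrite | github.com/anonarticle/BRACIS2026-SUBMISSION | GridWorldCanonicalBenchmarkSuite.py | find_unreachable_clusters
-- ===== SOURCE A (Python) =====
-- from typing import Dict, List, Optional, Sequence, Tuple, Set, Any
-- from collections import deque
--
-- Cell = Tuple[int, int]
--
-- def find_unreachable_clusters(
--     width: int,
--     height: int,
--     obstacles: Set[Cell],
--     goal: Cell
-- ) -> List[List[Cell]]:
--     """
--     Find clusters of free cells that cannot reach the goal.
--
--     Parameters
--     ----------
--     width : int
--         Grid width.
--     height : int
--         Grid height.
--     obstacles : set[(int, int)]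
--         Blocked cells.
--     goal : (int, int)
--         Goal cell.
--
--     Returns
--     -------
--     list[list[(int, int)]]
--         A list of unreachable clusters. Each cluster is a list of cells.
--     """
--     if width <= 0 or height <= 0:
--         return []
--
--     gx, gy = goal
--
--     def in_bounds(x: int, y: int) -> bool:
--         return 0 <= x < width and 0 <= y < height
--
--     def neighbors(x: int, y: int):
--         for dx, dy in ((1, 0), (-1, 0), (0, 1), (0, -1)):
--             nx, ny = x + dx, y + dy
--             if in_bounds(nx, ny):
--                 yield nx, ny
--
--     # If goal is invalid or blocked, then every free-cell component is unreachable.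
--     goal_is_valid_free = in_bounds(gx, gy) and goal not in obstacles
--
--     reachable = set()
--
--     if goal_is_valid_free:
--         queue = deque([goal])
--         reachable.add(goal)
--
--         while queue:
--             x, y = queue.popleft()
--             for nx, ny in neighbors(x, y):
--                 cell = (nx, ny)
--                 if cell not in obstacles and cell not in reachable:
--                     reachable.add(cell)
--                     queue.append(cell)
--
--     visited = set()
--     clusters = []
--
--     for y in range(height):
--         for x in range(width):
--             cell = (x, y)
--
--             if cell in obstacles or cell in reachable or cell in visited:
--                 continue
--
--             # New unreachable component
--             cluster = []
--             queue = deque([cell])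
--             visited.add(cell)
--
--             while queue:
--                 cx, cy = queue.popleft()
--                 cluster.append((cx, cy))
--
--                 for nx, ny in neighbors(cx, cy):
--                     ncell = (nx, ny)
--                     if (
--                         ncell not in obstacles
--                         and ncell not in reachable
--                         and ncell not in visited
--                     ):
--                         visited.add(ncell)
--                         queue.append(ncell)
--
--             clusters.append(cluster)
--
--     return clusters
-- ===== SOURCE B (Python) =====
-- def find_unreachable_clusters(width, height, obstacles, goal):
--     """One-pass connected-component labeling: flood every free component once
--     (row-major roots, delta order (1,0),(-1,0),(0,1),(0,-1)), using the
--     component list itself as the work queue, and keep every component except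
--     the one containing a valid free goal."""
--     if width <= 0 or height <= 0:
--         return []
--     gx, gy = goal
--     goal_free = (0 <= gx < width and 0 <= gy < height
--                  and goal not in obstacles)
--     seen = set()
--     out = []
--     for cell in ((x, y) for y in range(height) for x in range(width)):
--         if cell in obstacles or cell in seen:
--             continue
--         # flood the whole free component; comp doubles as the BFS queue
--         comp = [cell]
--         seen.add(cell)
--         i = 0
--         while i < len(comp):
--             cx, cy = comp[i]
--             i += 1
--             for dx, dy in ((1, 0), (-1, 0), (0, 1), (0, -1)):
--                 nx, ny = cx + dx, cy + dy
--                 if (0 <= nx < width and 0 <= ny < height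
--                         and (nx, ny) not in obstacles and (nx, ny) not in seen):
--                     seen.add((nx, ny))
--                     comp.append((nx, ny))
--         if not (goal_free and goal in comp):
--             out.append(comp)
--     return out
-- ===== Notes on version B (the rewrite author's own statement) =====
-- stated objective: alternative
-- what changed: A runs two staged passes (a BFS flood from the goal building a reachable set, then a second sweep labeling the leftover free cells); B is one connected-component labeling pass over all free cells, using the component list itself as the work queue (index pointer, no deque) and dropping the single component that contains a valid free goal.
import Mathlib
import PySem

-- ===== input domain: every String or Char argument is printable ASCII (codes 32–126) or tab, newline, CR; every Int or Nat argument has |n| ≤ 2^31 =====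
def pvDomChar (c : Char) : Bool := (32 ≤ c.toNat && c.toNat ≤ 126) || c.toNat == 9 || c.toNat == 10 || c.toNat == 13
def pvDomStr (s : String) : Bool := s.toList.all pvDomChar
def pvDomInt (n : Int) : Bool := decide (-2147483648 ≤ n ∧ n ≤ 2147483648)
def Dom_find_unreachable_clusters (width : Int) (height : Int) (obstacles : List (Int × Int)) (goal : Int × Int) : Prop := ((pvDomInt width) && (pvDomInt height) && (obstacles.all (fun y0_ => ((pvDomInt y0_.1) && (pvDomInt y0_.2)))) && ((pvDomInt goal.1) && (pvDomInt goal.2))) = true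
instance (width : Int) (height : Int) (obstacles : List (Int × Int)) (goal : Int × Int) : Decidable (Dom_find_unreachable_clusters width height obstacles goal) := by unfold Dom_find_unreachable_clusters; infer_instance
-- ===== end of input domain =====

-- B replaces A's two staged passes (deque-BFS flood from the goal building a reachable set,
-- then a second sweep labeling the leftover free cells) by ONE connected-component labeling
-- pass whose component list doubles as the work queue, dropping the component containing a
-- valid free goal; same return value, objective: alternative decomposition.

-- ===== PORT A ===== (Source A: flood from the goal, then label the leftover cells)
def pvInb (w h : Int) (c : Int × Int) : Bool :=
  decide (0 ≤ c.1 ∧ c.1 < w ∧ 0 ≤ c.2 ∧ c.2 < h)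

-- Source A's `neighbors`: candidates in order (1,0),(-1,0),(0,1),(0,-1), kept when in bounds
def pvNbrs (w h : Int) (c : Int × Int) : List (Int × Int) :=
  [(c.1 + 1, c.2), (c.1 - 1, c.2), (c.1, c.2 + 1), (c.1, c.2 - 1)].filter (pvInb w h)

-- one neighbor update of Source A's BFS inner loop: skip blocked/visited, else push & mark
def pvStep (blocked : Int × Int → Bool)
    (s : List (Int × Int) × PySem.Set (Int × Int)) (n : Int × Int) :
    List (Int × Int) × PySem.Set (Int × Int) :=
  if blocked n || PySem.Set.contains s.2 n then s else (s.1 ++ [n], PySem.Set.add s.2 n)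

-- termination bookkeeping for A's two BFS while-loops (proof artifact cited by decreasing_by)
def pvGrid (w h : Int) : List (Int × Int) :=
  (PySem.List.pyRange 0 h 1).flatMap (fun y => (PySem.List.pyRange 0 w 1).map (fun x => (x, y)))

def pvFreeCnt (w h : Int) (v : PySem.Set (Int × Int)) : Nat :=
  ((pvGrid w h).filter (fun c => !(PySem.Set.contains v c))).length

theorem pvFilter_mono {α : Type} (l : List α) (p q : α → Bool)
    (hpq : ∀ a, q a = true → p a = true) :
    (l.filter q).length ≤ (l.filter p).length := by
  rw [← List.countP_eq_length_filter, ← List.countP_eq_length_filter]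
  exact List.countP_mono_left (fun x _ h => hpq x h)

theorem pvFilter_length_lt {α : Type} (l : List α) (p q : α → Bool)
    (hpq : ∀ a, q a = true → p a = true) (x : α) (hx : x ∈ l)
    (hp : p x = true) (hq : q x = false) :
    (l.filter q).length < (l.filter p).length := by
  induction l with
  | nil => cases hx
  | cons a l ih =>
    have hmono := pvFilter_mono l p q hpq
    rcases List.mem_cons.1 hx with rfl | hx'
    · simp only [List.filter_cons, hp, hq, if_true, if_false, Bool.false_eq_true,
        List.length_cons]
      omega
    · have hlt := ih hx'
      by_cases hqa : q a = true
      · simp only [List.filter_cons, hqa, hpq a hqa, if_true, List.length_cons]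
        omega
      · rw [Bool.not_eq_true] at hqa
        simp only [List.filter_cons, hqa, Bool.false_eq_true, if_false]
        by_cases hpa : p a = true
        · simp only [hpa, if_true, List.length_cons]; omega
        · rw [Bool.not_eq_true] at hpa
          simp only [hpa, Bool.false_eq_true, if_false]; omega

theorem pvMem_pvGrid (w h : Int) (c : Int × Int) :
    c ∈ pvGrid w h ↔ pvInb w h c = true := by
  simp only [pvGrid, List.mem_flatMap, List.mem_map, PySem.List.mem_pyRange_one, pvInb,
    decide_eq_true_eq]
  constructor
  · rintro ⟨y, hy, x, hx, rfl⟩; exact ⟨hx.1, hx.2, hy.1, hy.2⟩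
  · rintro ⟨h1, h2, h3, h4⟩; exact ⟨c.2, ⟨h3, h4⟩, c.1, ⟨h1, h2⟩, rfl⟩

theorem pvNbrs_inb {w h : Int} {c n : Int × Int} (hn : n ∈ pvNbrs w h c) :
    pvInb w h n = true := (List.mem_filter.1 hn).2

theorem pvContains_false {α : Type} [BEq α] [LawfulBEq α] (s : PySem.Set α) (x : α) :
    PySem.Set.contains s x = false ↔ x ∉ s := by
  rw [← PySem.Set.contains_iff s x]
  cases h : PySem.Set.contains s x <;> simp

theorem pvFreeCnt_hpq (v : PySem.Set (Int × Int)) (c : Int × Int) :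
    ∀ a : Int × Int, (!(PySem.Set.contains (PySem.Set.add v c) a)) = true →
      (!(PySem.Set.contains v a)) = true := by
  intro a ha
  simp only [Bool.not_eq_true'] at ha ⊢
  rw [pvContains_false (PySem.Set.add v c) a] at ha
  rw [pvContains_false v a]
  exact fun hm => ha ((PySem.Set.mem_add v c a).2 (Or.inl hm))

theorem pvFreeCnt_add_lt (w h : Int) (v : PySem.Set (Int × Int)) (c : Int × Int)
    (hc : pvInb w h c = true) (hv : PySem.Set.contains v c = false) :
    pvFreeCnt w h (PySem.Set.add v c) < pvFreeCnt w h v := by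
  apply pvFilter_length_lt (pvGrid w h) _ _ (pvFreeCnt_hpq v c) c ((pvMem_pvGrid w h c).2 hc)
  · simp only [hv, Bool.not_false]
  · have hmem : PySem.Set.contains (PySem.Set.add v c) c = true :=
      (PySem.Set.contains_iff (PySem.Set.add v c) c).2 ((PySem.Set.mem_add v c c).2 (Or.inr rfl))
    simp only [hmem, Bool.not_true]

theorem pvStep_measure (w h : Int) (blocked : Int × Int → Bool)
    (ns : List (Int × Int)) (hns : ∀ n ∈ ns, pvInb w h n = true) :
    ∀ q v, 2 * pvFreeCnt w h ((ns.foldl (pvStep blocked) (q, v)).2)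
        + ((ns.foldl (pvStep blocked) (q, v)).1).length
      ≤ 2 * pvFreeCnt w h v + q.length := by
  induction ns with
  | nil => intro q v; simp
  | cons n ns ih =>
    intro q v
    have hn := hns n (List.mem_cons_self ..)
    have hns' : ∀ m ∈ ns, pvInb w h m = true := fun m hm => hns m (List.mem_cons_of_mem _ hm)
    have ih' := ih hns'
    simp only [List.foldl_cons]
    by_cases hb : (blocked n || PySem.Set.contains v n) = true
    · have e : pvStep blocked (q, v) n = (q, v) := by
        simp only [pvStep]; rw [if_pos hb]
      rw [e]; exact ih' q v
    · have e : pvStep blocked (q, v) n = (q ++ [n], PySem.Set.add v n) := by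
        simp only [pvStep]; rw [if_neg hb]
      rw [e]
      have hv : PySem.Set.contains v n = false := by
        have := Bool.not_eq_true (blocked n || PySem.Set.contains v n) ▸ hb
        simp only [Bool.or_eq_false_iff] at this
        exact this.2
      have hlt := pvFreeCnt_add_lt w h v n hn hv
      have := ih' (q ++ [n]) (PySem.Set.add v n)
      simp only [List.length_append, List.length_cons, List.length_nil] at *
      omega

-- Source A's deque BFS: pop from the front of the queue, push free unvisited neighbors
def pvBFS (w h : Int) (blocked : Int × Int → Bool) :
    List (Int × Int) → PySem.Set (Int × Int) → List (Int × Int) →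
    List (Int × Int) × PySem.Set (Int × Int)
  | [], v, cl => (cl, v)
  | c :: q, v, cl =>
    let s := (pvNbrs w h c).foldl (pvStep blocked) (q, v)
    pvBFS w h blocked s.1 s.2 (cl ++ [c])
termination_by q v cl => 2 * pvFreeCnt w h v + q.length
decreasing_by
  have hm := pvStep_measure w h blocked (pvNbrs w h c) (fun n hn => pvNbrs_inb hn) q v
  simp only [List.length_cons]
  omega

def find_unreachable_clusters (width : Int) (height : Int) (obstacles : List (Int × Int)) (goal : Int × Int) : List (List (Int × Int)) :=
  if width ≤ 0 ∨ height ≤ 0 then []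
  else
    let goalFree := pvInb width height goal && !(PySem.Set.contains obstacles goal)
    let reachable : PySem.Set (Int × Int) :=
      if goalFree then
        (pvBFS width height (fun c => PySem.Set.contains obstacles c) [goal]
          (PySem.Set.add PySem.Set.empty goal) []).2
      else PySem.Set.empty
    ((PySem.List.pyRange 0 height 1).foldl (fun st y =>
      (PySem.List.pyRange 0 width 1).foldl
        (fun (st : PySem.Set (Int × Int) × List (List (Int × Int))) x =>
          if PySem.Set.contains obstacles (x, y) || PySem.Set.contains reachable (x, y)
              || PySem.Set.contains st.1 (x, y) then st
          else
            let r := pvBFS width height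
              (fun c => PySem.Set.contains obstacles c || PySem.Set.contains reachable c)
              [(x, y)] (PySem.Set.add st.1 (x, y)) []
            (r.2, st.2 ++ [r.1])) st)
      ((PySem.Set.empty : PySem.Set (Int × Int)), ([] : List (List (Int × Int))))).2

-- ===== PORT B ===== (Source B: one labeling pass; the component list doubles as the work queue)
def bDeltas : List (Int × Int) := [(1, 0), (-1, 0), (0, 1), (0, -1)]

-- Source B's inner `for dx, dy in …` body: bounds, obstacle and seen checked in one condition
def bPush (w h : Int) (obs : PySem.Set (Int × Int)) (cx cy : Int)
    (s : List (Int × Int) × PySem.Set (Int × Int)) (d : Int × Int) :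
    List (Int × Int) × PySem.Set (Int × Int) :=
  if decide (0 ≤ cx + d.1 ∧ cx + d.1 < w ∧ 0 ≤ cy + d.2 ∧ cy + d.2 < h)
      && !(PySem.Set.contains obs (cx + d.1, cy + d.2))
      && !(PySem.Set.contains s.2 (cx + d.1, cy + d.2))
  then (s.1 ++ [(cx + d.1, cy + d.2)], PySem.Set.add s.2 (cx + d.1, cy + d.2))
  else s

-- Source B's `while i < len(comp)` loop; the fuel (one unit per grid cell, supplied by the
-- caller as the grid size) only makes the loop total and is never exhausted
def bGrow (w h : Int) (obs : PySem.Set (Int × Int)) :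
    Nat → List (Int × Int) → Nat → PySem.Set (Int × Int) →
    List (Int × Int) × PySem.Set (Int × Int)
  | 0, comp, _, v => (comp, v)
  | fuel + 1, comp, i, v =>
    if hlt : i < comp.length then
      let s := bDeltas.foldl (bPush w h obs comp[i].1 comp[i].2) (comp, v)
      bGrow w h obs fuel s.1 (i + 1) s.2
    else (comp, v)

-- Source B's row-major cell generator `((x, y) for y in range(height) for x in range(width))`
def bCells (w h : Int) : List (Int × Int) :=
  (PySem.List.pyRange 0 h 1).flatMap (fun y => (PySem.List.pyRange 0 w 1).map (fun x => (x, y)))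

def find_unreachable_clusters_alt (width : Int) (height : Int) (obstacles : List (Int × Int)) (goal : Int × Int) : List (List (Int × Int)) :=
  if width ≤ 0 ∨ height ≤ 0 then []
  else
    let goalFree := decide (0 ≤ goal.1 ∧ goal.1 < width ∧ 0 ≤ goal.2 ∧ goal.2 < height)
      && !(PySem.Set.contains obstacles goal)
    ((bCells width height).foldl
      (fun (st : PySem.Set (Int × Int) × List (List (Int × Int))) cell =>
        if PySem.Set.contains obstacles cell || PySem.Set.contains st.1 cell then st
        else
          let r := bGrow width height obstacles (bCells width height).length
            [cell] 0 (PySem.Set.add st.1 cell)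
          if goalFree && r.1.contains goal then (r.2, st.2) else (r.2, st.2 ++ [r.1]))
      ((PySem.Set.empty : PySem.Set (Int × Int)), ([] : List (List (Int × Int))))).2

-- ===== PRECONDITION & SPEC =====
def Spec_find_unreachable_clusters (width : Int) (height : Int) (obstacles : List (Int × Int)) (goal : Int × Int) (out : List (List (Int × Int))) : Prop := out = find_unreachable_clusters_alt width height obstacles goal
instance (width : Int) (height : Int) (obstacles : List (Int × Int)) (goal : Int × Int) (out : List (List (Int × Int))) : Decidable (Spec_find_unreachable_clusters width height obstacles goal out) := by unfold Spec_find_unreachable_clusters; infer_instance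

-- ===== CLAIM (what is proved, stated in full; the proofs are below) =====
def Claim_equal_find_unreachable_clusters : Prop := ∀ (width : Int) (height : Int) (obstacles : List (Int × Int)) (goal : Int × Int), Dom_find_unreachable_clusters width height obstacles goal → Spec_find_unreachable_clusters width height obstacles goal (find_unreachable_clusters width height obstacles goal)

-- ===== LEMMAS AND PROOFS =====
theorem foldl_pvStep_append (blocked : Int × Int → Bool) (ns : List (Int × Int)) :
    ∀ (l1 l2 : List (Int × Int)) v,
      ns.foldl (pvStep blocked) (l1 ++ l2, v)
        = (l1 ++ (ns.foldl (pvStep blocked) (l2, v)).1, (ns.foldl (pvStep blocked) (l2, v)).2) := by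
  induction ns with
  | nil => intro l1 l2 v; rfl
  | cons n ns ih =>
    intro l1 l2 v
    simp only [List.foldl_cons]
    by_cases hb : (blocked n || PySem.Set.contains v n) = true
    · have e1 : pvStep blocked (l1 ++ l2, v) n = (l1 ++ l2, v) := by
        simp only [pvStep]; rw [if_pos hb]
      have e2 : pvStep blocked (l2, v) n = (l2, v) := by
        simp only [pvStep]; rw [if_pos hb]
      rw [e1, e2]; exact ih l1 l2 v
    · have e1 : pvStep blocked (l1 ++ l2, v) n = (l1 ++ (l2 ++ [n]), PySem.Set.add v n) := by
        simp only [pvStep]; rw [if_neg hb]; simp [List.append_assoc]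
      have e2 : pvStep blocked (l2, v) n = (l2 ++ [n], PySem.Set.add v n) := by
        simp only [pvStep]; rw [if_neg hb]
      rw [e1, e2]; exact ih l1 (l2 ++ [n]) (PySem.Set.add v n)

theorem pvFold_spec (blocked : Int × Int → Bool) (ns : List (Int × Int)) :
    ∀ (q : List (Int × Int)) (v : PySem.Set (Int × Int)),
      ∃ A : List (Int × Int),
        ns.foldl (pvStep blocked) (q, v) = (q ++ A, v ++ A)
        ∧ A.Nodup
        ∧ (∀ x ∈ A, x ∈ ns ∧ blocked x = false ∧ x ∉ v)
        ∧ (∀ n ∈ ns, blocked n = false → n ∈ v ++ A) := by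
  induction ns with
  | nil => intro q v; exact ⟨[], by simp, by simp, by simp, by simp⟩
  | cons n ns ih =>
    intro q v
    simp only [List.foldl_cons]
    by_cases hb : (blocked n || PySem.Set.contains v n) = true
    · have e : pvStep blocked (q, v) n = (q, v) := by simp only [pvStep]; rw [if_pos hb]
      rw [e]
      obtain ⟨A, hA1, hAnd, hA2, hA3⟩ := ih q v
      refine ⟨A, hA1, hAnd, fun x hx => ?_, fun m hm hmb => ?_⟩
      · obtain ⟨h1, h2, h3⟩ := hA2 x hx
        exact ⟨List.mem_cons_of_mem _ h1, h2, h3⟩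
      · rcases List.mem_cons.1 hm with rfl | hm'
        · have hcv : PySem.Set.contains v m = true := by
            rcases Bool.or_eq_true_iff.1 hb with h1 | h1
            · rw [hmb] at h1; cases h1
            · exact h1
          exact List.mem_append.2 (Or.inl ((PySem.Set.contains_iff v m).1 hcv))
        · exact hA3 m hm' hmb
    · obtain ⟨hbn, hvn⟩ := Bool.or_eq_false_iff.1 (Bool.eq_false_iff.2 hb)
      have e : pvStep blocked (q, v) n = (q ++ [n], PySem.Set.add v n) := by
        simp only [pvStep]; rw [if_neg hb]
      have hnv : n ∉ v := (pvContains_false v n).1 hvn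
      rw [e, PySem.Set.add_of_not_mem hnv]
      obtain ⟨A', h1, hnd', h2, h3⟩ := ih (q ++ [n]) (v ++ [n])
      refine ⟨n :: A', ?_, ?_, ?_, ?_⟩
      · rw [h1]; simp
      · refine List.nodup_cons.2 ⟨fun hn => ?_, hnd'⟩
        exact (h2 n hn).2.2 (List.mem_append.2 (Or.inr (List.mem_singleton.2 rfl)))
      · intro x hx
        rcases List.mem_cons.1 hx with rfl | hx'
        · exact ⟨List.mem_cons_self .., hbn, hnv⟩
        · obtain ⟨m1, m2, m3⟩ := h2 x hx'
          exact ⟨List.mem_cons_of_mem _ m1, m2,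
            fun hxv => m3 (List.mem_append.2 (Or.inl hxv))⟩
      · intro m hm hmb
        rcases List.mem_cons.1 hm with rfl | hm'
        · exact List.mem_append.2 (Or.inr (List.mem_cons_self ..))
        · have h4 := h3 m hm' hmb
          simp only [List.mem_append, List.mem_cons] at h4 ⊢
          tauto

-- ===== bridging B's loop shapes to A-style primitives =====
theorem bCells_eq_pvGrid : bCells = pvGrid := rfl

theorem bPush_eq (w h : Int) (obs : PySem.Set (Int × Int)) (cx cy : Int)
    (s : List (Int × Int) × PySem.Set (Int × Int)) (d : Int × Int) :
    bPush w h obs cx cy s d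
      = if pvInb w h (cx + d.1, cy + d.2) = true
        then pvStep (fun c => PySem.Set.contains obs c) s (cx + d.1, cy + d.2) else s := by
  simp only [bPush, pvStep, pvInb]
  split_ifs <;> simp_all

theorem bFold_eq (w h : Int) (obs : PySem.Set (Int × Int)) (c : Int × Int)
    (q : List (Int × Int)) (v : PySem.Set (Int × Int)) :
    bDeltas.foldl (bPush w h obs c.1 c.2) (q, v)
      = (pvNbrs w h c).foldl (pvStep (fun x => PySem.Set.contains obs x)) (q, v) := by
  have h1 : pvNbrs w h c = (bDeltas.map (fun d => (c.1 + d.1, c.2 + d.2))).filter (pvInb w h) := by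
    simp [pvNbrs, bDeltas, sub_eq_add_neg]
  have hf : bPush w h obs c.1 c.2
      = fun (s : List (Int × Int) × PySem.Set (Int × Int)) (d : Int × Int) =>
          if pvInb w h (c.1 + d.1, c.2 + d.2) = true
          then pvStep (fun x => PySem.Set.contains obs x) s (c.1 + d.1, c.2 + d.2) else s := by
    funext s d
    exact bPush_eq w h obs c.1 c.2 s d
  rw [h1, List.foldl_filter, List.foldl_map, hf]

theorem pvNodup_length_le (comp : List (Int × Int)) (l : List (Int × Int))
    (hnd : comp.Nodup) (hsub : ∀ x ∈ comp, x ∈ l) : comp.length ≤ l.length := by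
  calc comp.length = comp.toFinset.card := (List.toFinset_card_of_nodup hnd).symm
    _ ≤ l.toFinset.card := Finset.card_le_card (fun x hx =>
        List.mem_toFinset.2 (hsub x (List.mem_toFinset.1 hx)))
    _ ≤ l.length := l.toFinset_card_le

-- B's index-pointer flood equals A's queue BFS: processed prefix = cluster, tail = queue
theorem bGrow_eq_pvBFS (w h : Int) (obs : PySem.Set (Int × Int)) :
    ∀ (fuel : Nat) (comp : List (Int × Int)) (i : Nat) (v : PySem.Set (Int × Int)),
      comp.Nodup → (∀ x ∈ comp, pvInb w h x = true) → (∀ x ∈ comp, x ∈ v) →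
      (pvGrid w h).length ≤ fuel + i →
      bGrow w h obs fuel comp i v
        = pvBFS w h (fun x => PySem.Set.contains obs x) (comp.drop i) v (comp.take i) := by
  intro fuel
  induction fuel with
  | zero =>
    intro comp i v hnd hinb hsub hfuel
    have hlen : comp.length ≤ i := by
      have := pvNodup_length_le comp (pvGrid w h) hnd
        (fun x hx => (pvMem_pvGrid w h x).2 (hinb x hx))
      omega
    rw [bGrow, List.drop_eq_nil_of_le hlen, List.take_of_length_le hlen, pvBFS]
  | succ fuel ih =>
    intro comp i v hnd hinb hsub hfuel
    by_cases hlt : i < comp.length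
    · rw [bGrow, dif_pos hlt]
      obtain ⟨A, hA1, hAnd, hA2, hA3⟩ :=
        pvFold_spec (fun x => PySem.Set.contains obs x) (pvNbrs w h comp[i]) comp v
      have hAin : ∀ x ∈ A, pvInb w h x = true := fun x hx => pvNbrs_inb (hA2 x hx).1
      have hAnotin : ∀ x ∈ A, x ∉ comp := fun x hx hc => (hA2 x hx).2.2 (hsub x hc)
      have hfold : bDeltas.foldl (bPush w h obs comp[i].1 comp[i].2) (comp, v)
          = (comp ++ A, v ++ A) := (bFold_eq w h obs comp[i] comp v).trans hA1
      rw [hfold]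
      rw [ih (comp ++ A) (i + 1) (v ++ A)
        (List.Nodup.append hnd hAnd (fun x hx hxA => hAnotin x hxA hx))
        (by intro x hx
            rcases List.mem_append.1 hx with hx' | hx'
            · exact hinb x hx'
            · exact hAin x hx')
        (by intro x hx
            rcases List.mem_append.1 hx with hx' | hx'
            · exact List.mem_append.2 (Or.inl (hsub x hx'))
            · exact List.mem_append.2 (Or.inr hx'))
        (by omega)]
      -- now unfold the RHS BFS one step
      rw [List.drop_eq_getElem_cons hlt, pvBFS]
      have hcomp := foldl_pvStep_append (fun x => PySem.Set.contains obs x)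
        (pvNbrs w h comp[i]) (comp.take (i + 1)) (comp.drop (i + 1)) v
      rw [List.take_append_drop (i + 1) comp, hA1] at hcomp
      have htl : (comp.take (i + 1)).length = i + 1 :=
        List.length_take_of_le (Nat.succ_le_of_lt hlt)
      have hX1 : ((pvNbrs w h comp[i]).foldl (pvStep (fun x => PySem.Set.contains obs x))
          (comp.drop (i + 1), v)).1 = comp.drop (i + 1) ++ A := by
        have := congrArg Prod.fst hcomp
        simp only at this
        have hc : comp ++ A = comp.take (i + 1) ++ (comp.drop (i + 1) ++ A) := by
          rw [← List.append_assoc, List.take_append_drop]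
        rw [hc] at this
        exact (List.append_cancel_left this).symm
      have hX2 : ((pvNbrs w h comp[i]).foldl (pvStep (fun x => PySem.Set.contains obs x))
          (comp.drop (i + 1), v)).2 = v ++ A := by
        have := congrArg Prod.snd hcomp
        simpa using this.symm
      simp only [hX1, hX2]
      rw [show comp ++ A = comp.take (i + 1) ++ (comp.drop (i + 1) ++ A) by
        rw [← List.append_assoc, List.take_append_drop]]
      rw [List.drop_left' htl, List.take_left' htl]
      have hts : comp.take (i + 1) = comp.take i ++ [comp[i]] := by
        rw [List.take_add_one, List.getElem?_eq_getElem hlt]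
        rfl
      rw [hts]
    · rw [bGrow, dif_neg hlt]
      have hlen : comp.length ≤ i := Nat.le_of_not_lt hlt
      rw [List.drop_eq_nil_of_le hlen, List.take_of_length_le hlen, pvBFS]

-- free-grid connectivity, root first
inductive pvReach (w h : Int) (obs : PySem.Set (Int × Int)) : (Int × Int) → (Int × Int) → Prop where
  | base (r : Int × Int) : pvReach w h obs r r
  | step {r c n : Int × Int} : pvReach w h obs r c → n ∈ pvNbrs w h c →
      PySem.Set.contains obs n = false → pvReach w h obs r n

theorem pvNbrs_symm (w h : Int) {c n : Int × Int} (hc : pvInb w h c = true)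
    (hn : n ∈ pvNbrs w h c) : c ∈ pvNbrs w h n := by
  have hmem := (List.mem_filter.1 hn).1
  apply List.mem_filter.2
  refine ⟨?_, hc⟩
  simp only [List.mem_cons, List.not_mem_nil, or_false] at hmem ⊢
  rcases hmem with h1|h1|h1|h1 <;> subst h1 <;> simp [Prod.ext_iff]

theorem pvReach_trans {w h : Int} {obs : PySem.Set (Int × Int)} {r b x : Int × Int}
    (h1 : pvReach w h obs r b) (h2 : pvReach w h obs b x) : pvReach w h obs r x := by
  induction h2 with
  | base => exact h1
  | step _ hn ho ih => exact .step ih hn ho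

theorem pvReach_props {w h : Int} {obs : PySem.Set (Int × Int)} {r x : Int × Int}
    (hx : pvReach w h obs r x) :
    x = r ∨ (pvInb w h x = true ∧ PySem.Set.contains obs x = false) := by
  induction hx with
  | base => exact Or.inl rfl
  | step _ hn ho _ => exact Or.inr ⟨pvNbrs_inb hn, ho⟩

theorem pvReach_symm {w h : Int} {obs : PySem.Set (Int × Int)} {r x : Int × Int}
    (hr1 : pvInb w h r = true) (hr2 : PySem.Set.contains obs r = false)
    (hx : pvReach w h obs r x) : pvReach w h obs x r := by
  induction hx with
  | base => exact .base r
  | step hrc hn ho ih =>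
    rename_i c n
    have hc : pvInb w h c = true ∧ PySem.Set.contains obs c = false := by
      rcases pvReach_props hrc with rfl | hp
      · exact ⟨hr1, hr2⟩
      · exact hp
    exact pvReach_trans (.step (.base n) (pvNbrs_symm w h hc.1 hn) hc.2) ih

-- soundness + monotonicity of the queue flood
theorem pvBFS_sound (w h : Int) (obs V0 : PySem.Set (Int × Int)) (r : Int × Int) :
    ∀ q v cl,
      (∀ x ∈ q, pvReach w h obs r x) →
      (∀ x, x ∈ v → x ∈ V0 ∨ (pvReach w h obs r x ∧ pvInb w h x = true ∧ PySem.Set.contains obs x = false)) →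
      (∀ x ∈ cl, pvReach w h obs r x) →
      (∀ x, x ∈ (pvBFS w h (fun c => PySem.Set.contains obs c) q v cl).2 →
          x ∈ V0 ∨ (pvReach w h obs r x ∧ pvInb w h x = true ∧ PySem.Set.contains obs x = false))
      ∧ (∀ x ∈ (pvBFS w h (fun c => PySem.Set.contains obs c) q v cl).1, pvReach w h obs r x)
      ∧ (∀ x, x ∈ v → x ∈ (pvBFS w h (fun c => PySem.Set.contains obs c) q v cl).2) := by
  intro q v cl
  induction q, v, cl using pvBFS.induct w h (fun c => PySem.Set.contains obs c) with
  | case1 v cl =>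
    intro hq hv hcl
    simp only [pvBFS]
    exact ⟨hv, hcl, fun x hx => hx⟩
  | case2 c q v cl s ih =>
    intro hq hv hcl
    obtain ⟨A, hA1, hAnd, hA2, hA3⟩ := pvFold_spec (fun c => PySem.Set.contains obs c) (pvNbrs w h c) q v
    have hrc : pvReach w h obs r c := hq c (List.mem_cons_self ..)
    have hAr : ∀ x ∈ A, pvReach w h obs r x ∧ pvInb w h x = true ∧ PySem.Set.contains obs x = false := by
      intro x hx
      obtain ⟨m1, m2, _⟩ := hA2 x hx
      exact ⟨.step hrc m1 m2, pvNbrs_inb m1, m2⟩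
    simp only [s, hA1] at ih
    have ih' := ih
      (by intro x hx
          rcases List.mem_append.1 hx with hx' | hx'
          · exact hq x (List.mem_cons_of_mem _ hx')
          · exact (hAr x hx').1)
      (by intro x hx
          rcases List.mem_append.1 hx with hx' | hx'
          · exact hv x hx'
          · exact Or.inr (hAr x hx'))
      (by intro x hx
          rcases List.mem_append.1 hx with hx' | hx'
          · exact hcl x hx'
          · rw [List.mem_singleton] at hx'; subst hx'; exact hrc)
    simp only [pvBFS, hA1]
    exact ⟨ih'.1, ih'.2.1, fun x hx => ih'.2.2 x (List.mem_append.2 (Or.inl hx))⟩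

-- at termination every non-V0 visited cell is in the cluster and free-neighbor-closed
theorem pvBFS_closed (w h : Int) (obs V0 : PySem.Set (Int × Int)) :
    ∀ q v cl,
      (∀ x, x ∈ v → x ∉ V0 →
        (x ∈ q ∨ (x ∈ cl ∧ ∀ n ∈ pvNbrs w h x, PySem.Set.contains obs n = false → n ∈ v))) →
      (∀ x ∈ q, x ∈ v) →
      ∀ x, x ∈ (pvBFS w h (fun c => PySem.Set.contains obs c) q v cl).2 → x ∉ V0 →
        (x ∈ (pvBFS w h (fun c => PySem.Set.contains obs c) q v cl).1
          ∧ ∀ n ∈ pvNbrs w h x, PySem.Set.contains obs n = false →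
              n ∈ (pvBFS w h (fun c => PySem.Set.contains obs c) q v cl).2) := by
  intro q v cl
  induction q, v, cl using pvBFS.induct w h (fun c => PySem.Set.contains obs c) with
  | case1 v cl =>
    intro hinv hqv x hx hxV
    simp only [pvBFS] at hx ⊢
    rcases hinv x hx hxV with h1 | h1
    · cases h1
    · exact h1
  | case2 c q v cl s ih =>
    intro hinv hqv
    obtain ⟨A, hA1, hAnd, hA2, hA3⟩ := pvFold_spec (fun c => PySem.Set.contains obs c) (pvNbrs w h c) q v
    simp only [s, hA1] at ih
    simp only [pvBFS, hA1]
    apply ih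
    · intro x hx hxV
      rcases List.mem_append.1 hx with hx' | hx'
      · rcases hinv x hx' hxV with h1 | h1
        · rcases List.mem_cons.1 h1 with rfl | h2
          · refine Or.inr ⟨List.mem_append.2 (Or.inr (List.mem_singleton.2 rfl)), ?_⟩
            intro n hn hno
            exact hA3 n hn hno
          · exact Or.inl (List.mem_append.2 (Or.inl h2))
        · exact Or.inr ⟨List.mem_append.2 (Or.inl h1.1),
            fun n hn hno => List.mem_append.2 (Or.inl (h1.2 n hn hno))⟩
      · exact Or.inl (List.mem_append.2 (Or.inr hx'))
    · intro x hx
      rcases List.mem_append.1 hx with hx' | hx'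
      · exact List.mem_append.2 (Or.inl (hqv x (List.mem_cons_of_mem _ hx')))
      · exact List.mem_append.2 (Or.inr hx')

-- full characterization of one component flood from a free in-bounds root
theorem pvComponent (w h : Int) (obs V0 : PySem.Set (Int × Int)) (r : Int × Int)
    (hr1 : pvInb w h r = true) (hr2 : PySem.Set.contains obs r = false)
    (hV0 : ∀ x, pvReach w h obs r x → x ∉ V0) :
    (∀ x, x ∈ (pvBFS w h (fun c => PySem.Set.contains obs c) [r] (PySem.Set.add V0 r) []).2
        ↔ (x ∈ V0 ∨ pvReach w h obs r x))
    ∧ (∀ x, x ∈ (pvBFS w h (fun c => PySem.Set.contains obs c) [r] (PySem.Set.add V0 r) []).1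
        ↔ pvReach w h obs r x) := by
  have hsound := pvBFS_sound w h obs V0 r [r] (PySem.Set.add V0 r) []
    (by intro x hx; rw [List.mem_singleton.1 hx]; exact .base r)
    (by intro x hx
        rcases (PySem.Set.mem_add V0 r x).1 hx with h1 | h2
        · exact Or.inl h1
        · rw [h2]; exact Or.inr ⟨.base r, hr1, hr2⟩)
    (by intro x hx; cases hx)
  have hclosed := pvBFS_closed w h obs V0 [r] (PySem.Set.add V0 r) []
    (by intro x hx hxV
        rcases (PySem.Set.mem_add V0 r x).1 hx with h1 | h2
        · exact absurd h1 hxV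
        · rw [h2]; exact Or.inl (List.mem_singleton.2 rfl))
    (by intro x hx; rw [List.mem_singleton.1 hx]
        exact (PySem.Set.mem_add V0 r r).2 (Or.inr rfl))
  have hkey : ∀ x, pvReach w h obs r x →
      x ∈ (pvBFS w h (fun c => PySem.Set.contains obs c) [r] (PySem.Set.add V0 r) []).2 := by
    intro x hx
    induction hx with
    | base => exact hsound.2.2 r ((PySem.Set.mem_add V0 r r).2 (Or.inr rfl))
    | step hrc hn ho ih =>
      rename_i c n
      exact (hclosed c ih (hV0 c hrc)).2 n hn ho
  constructor
  · intro x
    constructor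
    · intro hx
      rcases hsound.1 x hx with h1 | h1
      · exact Or.inl h1
      · exact Or.inr h1.1
    · rintro (h1 | h1)
      · exact hsound.2.2 x ((PySem.Set.mem_add V0 r x).2 (Or.inl h1))
      · exact hkey x h1
  · intro x
    constructor
    · intro hx; exact hsound.2.1 x hx
    · intro hx; exact (hclosed x (hkey x hx) (hV0 x hx)).1

-- visiteds that agree outside obstacles∪R make the two floods run in lockstep
theorem pvFold_parallel (obs R : PySem.Set (Int × Int)) (ns : List (Int × Int))
    (hns : ∀ n ∈ ns, PySem.Set.contains obs n = false → PySem.Set.contains R n = false) :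
    ∀ (q : List (Int × Int)) (vA vB : PySem.Set (Int × Int)),
      (∀ x, PySem.Set.contains obs x = false → PySem.Set.contains R x = false → (x ∈ vB ↔ x ∈ vA)) →
      ∃ A : List (Int × Int),
        ns.foldl (pvStep (fun c => PySem.Set.contains obs c || PySem.Set.contains R c)) (q, vA) = (q ++ A, vA ++ A)
        ∧ ns.foldl (pvStep (fun c => PySem.Set.contains obs c)) (q, vB) = (q ++ A, vB ++ A)
        ∧ (∀ x ∈ A, x ∈ ns ∧ PySem.Set.contains obs x = false ∧ PySem.Set.contains R x = false
            ∧ x ∉ vA ∧ x ∉ vB) := by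
  induction ns with
  | nil => intro q vA vB _; exact ⟨[], by simp, by simp, by simp⟩
  | cons n ns ih =>
    intro q vA vB hvis
    have hns' : ∀ m ∈ ns, PySem.Set.contains obs m = false → PySem.Set.contains R m = false :=
      fun m hm => hns m (List.mem_cons_of_mem _ hm)
    simp only [List.foldl_cons]
    by_cases hobs : PySem.Set.contains obs n = true
    · have eA : pvStep (fun c => PySem.Set.contains obs c || PySem.Set.contains R c) (q, vA) n = (q, vA) := by
        simp only [pvStep]; rw [if_pos (by simp only [Bool.or_eq_true]; exact Or.inl (Or.inl hobs))]
      have eB : pvStep (fun c => PySem.Set.contains obs c) (q, vB) n = (q, vB) := by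
        simp only [pvStep]; rw [if_pos (by simp only [Bool.or_eq_true]; exact Or.inl hobs)]
      rw [eA, eB]
      obtain ⟨A, h1, h2, h3⟩ := ih hns' q vA vB hvis
      exact ⟨A, h1, h2, fun x hx => by
        obtain ⟨m1, m2, m3, m4, m5⟩ := h3 x hx
        exact ⟨List.mem_cons_of_mem _ m1, m2, m3, m4, m5⟩⟩
    · have hobs' : PySem.Set.contains obs n = false := Bool.eq_false_iff.2 hobs
      have hRn : PySem.Set.contains R n = false := hns n (List.mem_cons_self ..) hobs'
      have hcc : PySem.Set.contains vB n = PySem.Set.contains vA n := by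
        cases hca : PySem.Set.contains vA n
        · rw [pvContains_false vB n]
          intro hm
          exact absurd ((PySem.Set.contains_iff vA n).2 ((hvis n hobs' hRn).1 hm))
            (by rw [hca]; simp)
        · exact (PySem.Set.contains_iff vB n).2 ((hvis n hobs' hRn).2
            ((PySem.Set.contains_iff vA n).1 hca))
      by_cases hva : PySem.Set.contains vA n = true
      · have eA : pvStep (fun c => PySem.Set.contains obs c || PySem.Set.contains R c) (q, vA) n = (q, vA) := by
          simp only [pvStep]; rw [if_pos (by simp only [Bool.or_eq_true]; exact Or.inr hva)]
        have eB : pvStep (fun c => PySem.Set.contains obs c) (q, vB) n = (q, vB) := by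
          simp only [pvStep]; rw [if_pos (by simp only [Bool.or_eq_true]; exact Or.inr (hcc.trans hva))]
        rw [eA, eB]
        obtain ⟨A, h1, h2, h3⟩ := ih hns' q vA vB hvis
        exact ⟨A, h1, h2, fun x hx => by
          obtain ⟨m1, m2, m3, m4, m5⟩ := h3 x hx
          exact ⟨List.mem_cons_of_mem _ m1, m2, m3, m4, m5⟩⟩
      · have hva' : PySem.Set.contains vA n = false := Bool.eq_false_iff.2 hva
        have hvb' : PySem.Set.contains vB n = false := hcc.trans hva'
        have hnA : n ∉ vA := (pvContains_false vA n).1 hva'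
        have hnB : n ∉ vB := (pvContains_false vB n).1 hvb'
        have eA : pvStep (fun c => PySem.Set.contains obs c || PySem.Set.contains R c) (q, vA) n
            = (q ++ [n], vA ++ [n]) := by
          simp only [pvStep]
          rw [if_neg (by simp only [Bool.or_eq_true]; rintro ((h1 | h1) | h1) <;> simp_all)]
          rw [PySem.Set.add_of_not_mem hnA]
        have eB : pvStep (fun c => PySem.Set.contains obs c) (q, vB) n = (q ++ [n], vB ++ [n]) := by
          simp only [pvStep]
          rw [if_neg (by simp only [Bool.or_eq_true]; rintro (h1 | h1) <;> simp_all)]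
          rw [PySem.Set.add_of_not_mem hnB]
        rw [eA, eB]
        have hvis' : ∀ x, PySem.Set.contains obs x = false → PySem.Set.contains R x = false →
            (x ∈ vB ++ [n] ↔ x ∈ vA ++ [n]) := by
          intro x hx1 hx2
          simp only [List.mem_append, List.mem_singleton]
          exact or_congr_left (hvis x hx1 hx2)
        obtain ⟨A', h1, h2, h3⟩ := ih hns' (q ++ [n]) (vA ++ [n]) (vB ++ [n]) hvis'
        refine ⟨n :: A', ?_, ?_, ?_⟩
        · rw [h1]; simp
        · rw [h2]; simp
        · intro x hx
          rcases List.mem_cons.1 hx with rfl | hx'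
          · exact ⟨List.mem_cons_self .., hobs', hRn, hnA, hnB⟩
          · obtain ⟨m1, m2, m3, m4, m5⟩ := h3 x hx'
            exact ⟨List.mem_cons_of_mem _ m1, m2, m3,
              fun hc => m4 (List.mem_append.2 (Or.inl hc)),
              fun hc => m5 (List.mem_append.2 (Or.inl hc))⟩

theorem pvBFS_parallel (w h : Int) (obs R : PySem.Set (Int × Int))
    (hRcl : ∀ c n, PySem.Set.contains R c = true → n ∈ pvNbrs w h c →
      PySem.Set.contains obs n = false → PySem.Set.contains R n = true) :
    ∀ q vA cl,
      ∀ vB : PySem.Set (Int × Int),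
      (∀ x ∈ q, pvInb w h x = true ∧ PySem.Set.contains obs x = false ∧ PySem.Set.contains R x = false) →
      (∀ x, PySem.Set.contains obs x = false → PySem.Set.contains R x = false → (x ∈ vB ↔ x ∈ vA)) →
      (pvBFS w h (fun c => PySem.Set.contains obs c || PySem.Set.contains R c) q vA cl).1
          = (pvBFS w h (fun c => PySem.Set.contains obs c) q vB cl).1
      ∧ (∀ x, PySem.Set.contains obs x = false → PySem.Set.contains R x = false →
          (x ∈ (pvBFS w h (fun c => PySem.Set.contains obs c) q vB cl).2
            ↔ x ∈ (pvBFS w h (fun c => PySem.Set.contains obs c || PySem.Set.contains R c) q vA cl).2))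
      ∧ (∀ x, x ∈ (pvBFS w h (fun c => PySem.Set.contains obs c || PySem.Set.contains R c) q vA cl).2 →
          x ∈ vA ∨ PySem.Set.contains R x = false)
      ∧ (∀ x, x ∈ (pvBFS w h (fun c => PySem.Set.contains obs c) q vB cl).2 →
          x ∈ vB ∨ PySem.Set.contains R x = false)
      ∧ (∀ x ∈ (pvBFS w h (fun c => PySem.Set.contains obs c || PySem.Set.contains R c) q vA cl).1,
          x ∈ cl ∨ PySem.Set.contains R x = false)
      ∧ (∀ x, x ∈ vB → x ∈ (pvBFS w h (fun c => PySem.Set.contains obs c) q vB cl).2) := by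
  intro q vA cl
  induction q, vA, cl using pvBFS.induct w h (fun c => PySem.Set.contains obs c || PySem.Set.contains R c) with
  | case1 vA cl =>
    intro vB hq hvis
    simp only [pvBFS]
    exact ⟨trivial, hvis, fun x hx => Or.inl hx, fun x hx => Or.inl hx,
      fun x hx => Or.inl hx, fun x hx => hx⟩
  | case2 c q vA cl s ih =>
    intro vB hq hvis
    obtain ⟨hcinb, hcobs, hcR⟩ := hq c (List.mem_cons_self ..)
    have hns : ∀ n ∈ pvNbrs w h c, PySem.Set.contains obs n = false →
        PySem.Set.contains R n = false := by
      intro n hn hnobs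
      by_contra hcon
      have hRn : PySem.Set.contains R n = true := by
        cases hx : PySem.Set.contains R n
        · exact absurd hx hcon
        · rfl
      have := hRcl n c hRn (pvNbrs_symm w h hcinb hn) hcobs
      rw [this] at hcR; cases hcR
    obtain ⟨A, hA1, hA2, hA3⟩ := pvFold_parallel obs R (pvNbrs w h c) hns q vA vB hvis
    have hAp : ∀ x ∈ A, pvInb w h x = true ∧ PySem.Set.contains obs x = false
        ∧ PySem.Set.contains R x = false := by
      intro x hx
      obtain ⟨m1, m2, m3, _, _⟩ := hA3 x hx
      exact ⟨pvNbrs_inb m1, m2, m3⟩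
    simp only [s, hA1] at ih
    have hvis' : ∀ x, PySem.Set.contains obs x = false → PySem.Set.contains R x = false →
        (x ∈ vB ++ A ↔ x ∈ vA ++ A) := by
      intro x h1 h2
      simp only [List.mem_append]
      exact or_congr_left (hvis x h1 h2)
    have ih' := ih (vB ++ A)
      (by intro x hx
          rcases List.mem_append.1 hx with hx' | hx'
          · exact hq x (List.mem_cons_of_mem _ hx')
          · exact hAp x hx')
      hvis'
    have eB : pvBFS w h (fun c => PySem.Set.contains obs c) (c :: q) vB cl
        = pvBFS w h (fun c => PySem.Set.contains obs c) (q ++ A) (vB ++ A) (cl ++ [c]) := by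
      simp only [pvBFS, hA2]
    have eA : pvBFS w h (fun c => PySem.Set.contains obs c || PySem.Set.contains R c) (c :: q) vA cl
        = pvBFS w h (fun c => PySem.Set.contains obs c || PySem.Set.contains R c) (q ++ A) (vA ++ A) (cl ++ [c]) := by
      simp only [pvBFS, hA1]
    rw [eA, eB]
    obtain ⟨i1, i2, i3, i4, i5, i6⟩ := ih'
    refine ⟨i1, i2, ?_, ?_, ?_, ?_⟩
    · intro x hx
      rcases i3 x hx with h1 | h1
      · rcases List.mem_append.1 h1 with h2 | h2
        · exact Or.inl h2
        · exact Or.inr (hAp x h2).2.2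
      · exact Or.inr h1
    · intro x hx
      rcases i4 x hx with h1 | h1
      · rcases List.mem_append.1 h1 with h2 | h2
        · exact Or.inl h2
        · exact Or.inr (hAp x h2).2.2
      · exact Or.inr h1
    · intro x hx
      rcases i5 x hx with h1 | h1
      · rcases List.mem_append.1 h1 with h2 | h2
        · exact Or.inl h2
        · rw [List.mem_singleton] at h2; rw [h2]; exact Or.inr hcR
      · exact Or.inr h1
    · intro x hx
      exact i6 x (List.mem_append.2 (Or.inl hx))

theorem pvScan_flatten {σ : Type} (w h : Int) (F : σ → (Int × Int) → σ) (init : σ) :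
    (PySem.List.pyRange 0 h 1).foldl
      (fun st y => (PySem.List.pyRange 0 w 1).foldl (fun st x => F st (x, y)) st) init
    = (pvGrid w h).foldl F init := by
  rw [pvGrid, List.foldl_flatMap]
  simp only [List.foldl_map]

-- the two per-cell scan bodies (proof-local names for the port loop bodies)
def pvBodyA (w h : Int) (obs R : PySem.Set (Int × Int))
    (st : PySem.Set (Int × Int) × List (List (Int × Int))) (cell : Int × Int) :
    PySem.Set (Int × Int) × List (List (Int × Int)) :=
  if PySem.Set.contains obs cell || PySem.Set.contains R cell || PySem.Set.contains st.1 cell then st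
  else
    ((pvBFS w h (fun c => PySem.Set.contains obs c || PySem.Set.contains R c) [cell] (PySem.Set.add st.1 cell) []).2,
     st.2 ++ [(pvBFS w h (fun c => PySem.Set.contains obs c || PySem.Set.contains R c) [cell] (PySem.Set.add st.1 cell) []).1])

def pvBodyB (w h : Int) (obs : PySem.Set (Int × Int)) (goal : Int × Int) (gf : Bool)
    (st : PySem.Set (Int × Int) × List (List (Int × Int))) (cell : Int × Int) :
    PySem.Set (Int × Int) × List (List (Int × Int)) :=
  if PySem.Set.contains obs cell || PySem.Set.contains st.1 cell then st
  else
    if gf && (bGrow w h obs (bCells w h).length [cell] 0 (PySem.Set.add st.1 cell)).1.contains goal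
    then ((bGrow w h obs (bCells w h).length [cell] 0 (PySem.Set.add st.1 cell)).2, st.2)
    else ((bGrow w h obs (bCells w h).length [cell] 0 (PySem.Set.add st.1 cell)).2,
          st.2 ++ [(bGrow w h obs (bCells w h).length [cell] 0 (PySem.Set.add st.1 cell)).1])

-- the bridge used at each B-side root: B's index-pointer flood = A-style queue BFS
theorem pvBridge (w h : Int) (obs : PySem.Set (Int × Int)) (cell : Int × Int)
    (hcinb : pvInb w h cell = true) (v : PySem.Set (Int × Int)) :
    bGrow w h obs (bCells w h).length [cell] 0 (PySem.Set.add v cell)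
      = pvBFS w h (fun x => PySem.Set.contains obs x) [cell] (PySem.Set.add v cell) [] := by
  have := bGrow_eq_pvBFS w h obs (bCells w h).length [cell] 0 (PySem.Set.add v cell)
    (by simp)
    (by intro x hx; rw [List.mem_singleton.1 hx]; exact hcinb)
    (by intro x hx; rw [List.mem_singleton.1 hx]
        exact (PySem.Set.mem_add v cell cell).2 (Or.inr rfl))
    (by rw [bCells_eq_pvGrid]; omega)
  simpa using this

theorem pvScan_eq (w h : Int) (obs R : PySem.Set (Int × Int)) (goal : Int × Int) (gf : Bool)
    (hRcl : ∀ c n, PySem.Set.contains R c = true → n ∈ pvNbrs w h c →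
      PySem.Set.contains obs n = false → PySem.Set.contains R n = true)
    (hGF : gf = true → pvInb w h goal = true ∧ PySem.Set.contains obs goal = false
      ∧ (∀ x, PySem.Set.contains R x = true ↔ pvReach w h obs goal x))
    (hGF0 : gf = false → ∀ x, PySem.Set.contains R x = false) :
    ∀ cells : List (Int × Int), (∀ c ∈ cells, pvInb w h c = true) →
    ∀ (vA vB : PySem.Set (Int × Int)) (clsA clsB : List (List (Int × Int))),
      clsA = clsB →
      (∀ x, PySem.Set.contains obs x = false → PySem.Set.contains R x = false → (x ∈ vB ↔ x ∈ vA)) →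
      (∀ x, x ∈ vA → PySem.Set.contains R x = false) →
      ((∀ x, PySem.Set.contains R x = true → x ∉ vB) ∨ (∀ x, PySem.Set.contains R x = true → x ∈ vB)) →
      (cells.foldl (pvBodyA w h obs R) (vA, clsA)).2 = (cells.foldl (pvBodyB w h obs goal gf) (vB, clsB)).2 := by
  intro cells
  induction cells with
  | nil => intro _ vA vB clsA clsB hcls _ _ _; simpa using hcls
  | cons c cells ih =>
    intro hcells vA vB clsA clsB hcls hvis hI3 hI4
    have hcinb : pvInb w h c = true := hcells c (List.mem_cons_self ..)
    have hcells' : ∀ x ∈ cells, pvInb w h x = true := fun x hx => hcells x (List.mem_cons_of_mem _ hx)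
    simp only [List.foldl_cons]
    by_cases hobs : PySem.Set.contains obs c = true
    · have eA : pvBodyA w h obs R (vA, clsA) c = (vA, clsA) := by
        unfold pvBodyA; rw [if_pos (by rw [hobs]; rfl)]
      have eB : pvBodyB w h obs goal gf (vB, clsB) c = (vB, clsB) := by
        unfold pvBodyB; rw [if_pos (by rw [hobs]; rfl)]
      rw [eA, eB]
      exact ih hcells' vA vB clsA clsB hcls hvis hI3 hI4
    · have hobs' : PySem.Set.contains obs c = false := Bool.eq_false_iff.2 hobs
      by_cases hR : PySem.Set.contains R c = true
      · -- c is in the goal component: A skips it via `reachable`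
        have hgt : gf = true := by
          cases hgf : gf
          · rw [hGF0 hgf c] at hR; cases hR
          · rfl
        obtain ⟨hginb, hgobs, hGiff⟩ := hGF hgt
        have eA : pvBodyA w h obs R (vA, clsA) c = (vA, clsA) := by
          unfold pvBodyA
          rw [if_pos (by rw [hobs', hR]; rfl)]
        rw [eA]
        rcases hI4 with hL | hRsub
        · -- B has not seen the goal component yet: it floods it now and drops it
          have hcvB : PySem.Set.contains vB c = false := (pvContains_false vB c).2 (hL c hR)
          have eifB : (PySem.Set.contains obs c || PySem.Set.contains vB c) = false := by
            rw [hobs', hcvB]; rfl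
          have hreach_gc : pvReach w h obs goal c := (hGiff c).1 hR
          have hV0 : ∀ x, pvReach w h obs c x → x ∉ vB := by
            intro x hx
            exact hL x ((hGiff x).2 (pvReach_trans hreach_gc hx))
          have hcomp := pvComponent w h obs vB c hcinb hobs' hV0
          have hreach_cg : pvReach w h obs c goal := pvReach_symm hginb hgobs hreach_gc
          have hgoal_mem : goal ∈ (pvBFS w h (fun x => PySem.Set.contains obs x) [c] (PySem.Set.add vB c) []).1 :=
            (hcomp.2 goal).2 hreach_cg
          have eB : pvBodyB w h obs goal gf (vB, clsB) c
              = ((pvBFS w h (fun x => PySem.Set.contains obs x) [c] (PySem.Set.add vB c) []).2, clsB) := by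
            unfold pvBodyB
            rw [if_neg (by rw [eifB]; simp)]
            rw [pvBridge w h obs c hcinb vB]
            rw [if_pos (by rw [hgt, Bool.true_and]; exact List.contains_iff_mem.2 hgoal_mem)]
          rw [eB]
          apply ih hcells' vA _ clsA clsB hcls
          · intro x hx1 hx2
            rw [hcomp.1 x]
            have hnr : ¬ pvReach w h obs c x := by
              intro hr
              rw [(hGiff x).2 (pvReach_trans hreach_gc hr)] at hx2; cases hx2
            constructor
            · rintro (h1 | h1)
              · exact (hvis x hx1 hx2).1 h1
              · exact absurd h1 hnr
            · intro h1; exact Or.inl ((hvis x hx1 hx2).2 h1)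
          · exact hI3
          · right
            intro x hx
            rw [hcomp.1 x]
            exact Or.inr (pvReach_trans hreach_cg ((hGiff x).1 hx))
        · -- B already flooded the goal component: it skips c too
          have hcvB : PySem.Set.contains vB c = true := (PySem.Set.contains_iff vB c).2 (hRsub c hR)
          have eB : pvBodyB w h obs goal gf (vB, clsB) c = (vB, clsB) := by
            unfold pvBodyB
            rw [if_pos (by rw [hobs', hcvB]; rfl)]
          rw [eB]
          exact ih hcells' vA vB clsA clsB hcls hvis hI3 (Or.inr hRsub)
      · -- c is not in the goal component: both sides behave identically
        have hR' : PySem.Set.contains R c = false := Bool.eq_false_iff.2 hR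
        have hcc : PySem.Set.contains vB c = PySem.Set.contains vA c := by
          cases hca : PySem.Set.contains vA c
          · rw [pvContains_false vB c]
            intro hm
            exact absurd ((PySem.Set.contains_iff vA c).2 ((hvis c hobs' hR').1 hm))
              (by rw [hca]; simp)
          · exact (PySem.Set.contains_iff vB c).2 ((hvis c hobs' hR').2
              ((PySem.Set.contains_iff vA c).1 hca))
        by_cases hva : PySem.Set.contains vA c = true
        · have eA : pvBodyA w h obs R (vA, clsA) c = (vA, clsA) := by
            unfold pvBodyA
            rw [if_pos (by rw [hobs', hR', hva]; rfl)]
          have eB : pvBodyB w h obs goal gf (vB, clsB) c = (vB, clsB) := by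
            unfold pvBodyB
            rw [if_pos (by rw [hobs', hcc.trans hva]; rfl)]
          rw [eA, eB]
          exact ih hcells' vA vB clsA clsB hcls hvis hI3 hI4
        · have hva' : PySem.Set.contains vA c = false := Bool.eq_false_iff.2 hva
          have hvb' : PySem.Set.contains vB c = false := hcc.trans hva'
          have hvis' : ∀ x, PySem.Set.contains obs x = false → PySem.Set.contains R x = false →
              (x ∈ PySem.Set.add vB c ↔ x ∈ PySem.Set.add vA c) := by
            intro x h1 h2
            rw [PySem.Set.mem_add vB c x, PySem.Set.mem_add vA c x]
            exact or_congr_left (hvis x h1 h2)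
          have hpar := pvBFS_parallel w h obs R hRcl [c] (PySem.Set.add vA c) []
            (PySem.Set.add vB c)
            (by intro x hx; rw [List.mem_singleton.1 hx]; exact ⟨hcinb, hobs', hR'⟩)
            hvis'
          obtain ⟨i1, i2, i3, i4, i5, i6⟩ := hpar
          have eA : pvBodyA w h obs R (vA, clsA) c
              = ((pvBFS w h (fun x => PySem.Set.contains obs x || PySem.Set.contains R x) [c] (PySem.Set.add vA c) []).2,
                 clsA ++ [(pvBFS w h (fun x => PySem.Set.contains obs x || PySem.Set.contains R x) [c] (PySem.Set.add vA c) []).1]) := by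
            unfold pvBodyA
            rw [if_neg (by rw [hobs', hR', hva']; simp)]
          have hnotgoal : (gf && (pvBFS w h (fun x => PySem.Set.contains obs x) [c] (PySem.Set.add vB c) []).1.contains goal) = false := by
            cases hgf : gf
            · rfl
            · obtain ⟨hginb, hgobs, hGiff⟩ := hGF hgf
              have hRg : PySem.Set.contains R goal = true := (hGiff goal).2 (.base goal)
              have : goal ∉ (pvBFS w h (fun x => PySem.Set.contains obs x) [c] (PySem.Set.add vB c) []).1 := by
                intro hmem
                rw [← i1] at hmem
                rcases i5 goal hmem with h1 | h1
                · cases h1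
                · rw [h1] at hRg; cases hRg
              rw [Bool.true_and, ← Bool.not_eq_true, List.contains_iff_mem]
              exact this
          have eB : pvBodyB w h obs goal gf (vB, clsB) c
              = ((pvBFS w h (fun x => PySem.Set.contains obs x) [c] (PySem.Set.add vB c) []).2,
                 clsB ++ [(pvBFS w h (fun x => PySem.Set.contains obs x) [c] (PySem.Set.add vB c) []).1]) := by
            unfold pvBodyB
            rw [if_neg (by rw [hobs', hvb']; simp)]
            rw [pvBridge w h obs c hcinb vB, if_neg (by rw [hnotgoal]; simp)]
          rw [eA, eB]
          apply ih hcells' _ _ _ _ ?_ ?_ ?_ ?_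
          · rw [hcls, i1]
          · intro x h1 h2
            exact i2 x h1 h2
          · intro x hx
            rcases i3 x hx with h1 | h1
            · rcases (PySem.Set.mem_add vA c x).1 h1 with h2 | h2
              · exact hI3 x h2
              · rw [h2]; exact hR'
            · exact h1
          · rcases hI4 with hL | hRsub
            · left
              intro x hx hmem
              rcases i4 x hmem with h1 | h1
              · rcases (PySem.Set.mem_add vB c x).1 h1 with h2 | h2
                · exact hL x hx h2
                · rw [h2] at hx; rw [hx] at hR; exact hR rfl
              · rw [h1] at hx; cases hx
            · right
              intro x hx
              exact i6 x ((PySem.Set.mem_add vB c x).2 (Or.inl (hRsub x hx)))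

theorem pvContains_empty (x : Int × Int) :
    PySem.Set.contains (PySem.Set.empty : PySem.Set (Int × Int)) x = false := rfl

theorem pvMain (w h : Int) (obs R : PySem.Set (Int × Int)) (goal : Int × Int) (gf : Bool)
    (hRcl : ∀ c n, PySem.Set.contains R c = true → n ∈ pvNbrs w h c →
      PySem.Set.contains obs n = false → PySem.Set.contains R n = true)
    (hGF : gf = true → pvInb w h goal = true ∧ PySem.Set.contains obs goal = false
      ∧ (∀ x, PySem.Set.contains R x = true ↔ pvReach w h obs goal x))
    (hGF0 : gf = false → ∀ x, PySem.Set.contains R x = false) :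
    ((PySem.List.pyRange 0 h 1).foldl (fun st y =>
        (PySem.List.pyRange 0 w 1).foldl (fun st x => pvBodyA w h obs R st (x, y)) st)
      ((PySem.Set.empty : PySem.Set (Int × Int)), ([] : List (List (Int × Int))))).2
    = ((bCells w h).foldl (pvBodyB w h obs goal gf)
      ((PySem.Set.empty : PySem.Set (Int × Int)), ([] : List (List (Int × Int))))).2 := by
  rw [pvScan_flatten w h (pvBodyA w h obs R) (PySem.Set.empty, []), bCells_eq_pvGrid]
  exact pvScan_eq w h obs R goal gf hRcl hGF hGF0 (pvGrid w h)
    (fun c hc => (pvMem_pvGrid w h c).1 hc) PySem.Set.empty PySem.Set.empty [] [] rfl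
    (fun x _ _ => Iff.rfl)
    (fun x hx => (List.not_mem_nil hx).elim)
    (Or.inl (fun x _ hx => List.not_mem_nil hx))

-- ===== VERDICT (by name: the statement is the Claim_ definition above) =====
theorem find_unreachable_clusters_spec : Claim_equal_find_unreachable_clusters := by
  intro w h obstacles goal _
  unfold Spec_find_unreachable_clusters find_unreachable_clusters find_unreachable_clusters_alt
  by_cases hwh : w ≤ 0 ∨ h ≤ 0
  · rw [if_pos hwh, if_pos hwh]
  · rw [if_neg hwh, if_neg hwh]
    rw [show (decide (0 ≤ goal.1 ∧ goal.1 < w ∧ 0 ≤ goal.2 ∧ goal.2 < h) : Bool)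
      = pvInb w h goal from rfl]
    cases hgf : (pvInb w h goal && !(PySem.Set.contains obstacles goal))
    · exact pvMain w h obstacles PySem.Set.empty goal false
        (fun c n hc _ _ => by rw [pvContains_empty] at hc; cases hc)
        (fun hcon => by cases hcon)
        (fun _ x => pvContains_empty x)
    · have hgf' := hgf
      rw [Bool.and_eq_true] at hgf'
      obtain ⟨hginb, hnot⟩ := hgf'
      have hgobs : PySem.Set.contains obstacles goal = false := by
        rw [Bool.not_eq_true'] at hnot; exact hnot
      have hcomp := pvComponent w h obstacles PySem.Set.empty goal hginb hgobs
        (fun x _ hx => List.not_mem_nil hx)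
      have hTiff : ∀ x, x ∈ (pvBFS w h (fun c => PySem.Set.contains obstacles c) [goal]
          (PySem.Set.add PySem.Set.empty goal) []).2 ↔ pvReach w h obstacles goal x := by
        intro x
        refine (hcomp.1 x).trans ?_
        constructor
        · rintro (h1 | h1)
          · exact (List.not_mem_nil h1).elim
          · exact h1
        · exact Or.inr
      refine pvMain w h obstacles
        ((pvBFS w h (fun c => PySem.Set.contains obstacles c) [goal]
          (PySem.Set.add PySem.Set.empty goal) []).2) goal true ?_ ?_ ?_
      · intro c n hc hn hno
        have h1 : pvReach w h obstacles goal c := (hTiff c).1 ((PySem.Set.contains_iff _ c).1 hc)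
        exact (PySem.Set.contains_iff _ n).2 ((hTiff n).2 (.step h1 hn hno))
      · intro _
        refine ⟨hginb, hgobs, fun x => ?_⟩
        constructor
        · intro hx; exact (hTiff x).1 ((PySem.Set.contains_iff _ x).1 hx)
        · intro hx; exact (PySem.Set.contains_iff _ x).2 ((hTiff x).2 hx)
      · intro hcon; cases hcon
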